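-- pv_equiv track=rewrite | github.com/HaeYeon-Won/I-Studied | CodingStudy/삼성기출풀어보기/[14890]경사로.py | runway
-- ===== SOURCE A (Python) =====
-- def runway(l, way):
--     # 길을 지나갈 수 있으려면 길에 속한 모든 칸의 높이가 모두 같아야 한다.
--     # 또는, 경사로를 놓아서 지나갈 수 있는 길을 만들 수 있다. 경사로는 높이가 항상 1이며, 길이는 L이다.
--     accumulate = 1 #중복적으로 나오는 횟수
--     before = way[0] # 직전 높이
--     i=1
--     runway = [0]*(len(way)) #경사로 설치 위치
--     while i!=len(way):
--         now = way[i]#현재 높이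
--         if now==before and runway[i-1]!=1:#직전에 경사로 설치 x , 직전이랑 현재 높이가 같으면
--             accumulate+=1#누적 +1
--         else:
--             diff = now-before #높이차이
--             if abs(diff)>=2: return False #높이차이 2이상 => 경사로 못놓음
--             if diff==1: #지금까지 쌓아온걸 보면됨(올라가는형태)
--                 if accumulate<l: #지금까지 쌓은양이 경사로 길이보다 짧으면 경사로 못놈
--                     return False
--                 count=1 #경사로 놓을 수 있는 땅 숫자
--                 if runway[i-1]==1: #now 직전에 경사로 이미 있으면 경사로 못놓음
--                     return False
--                 for j in range(i-1, i-2-l, -1): #지금 위치 직전에서 경사로 길이까지 반복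
--                     if count==l: # 경사로 충분히 쌓을 수 있으면 break
--                         break
--                     if runway[j]==1: # 만약 경사로 길이 안됐는데 경사로 있으면 거긴 못놓으니까 return False
--                         return False
--                     count+=1
--
--             elif diff==-1: #다음껄 봐야함(내려가는형태)
--                 if len(way)-i<l: #남아있는칸이 경사로 길이보다 짧으면 못놓음
--                     return False
--                 else:
--                     count = 1
--                     #이경우는 before -> now로 내려가는 형태
--                     runway[i]=1 #일단 지금위치에 경사로 설치
--                     for j in range(i+1, len(way)): #설치한 뒤부터 봄
--                         if count==l: # 경사로 조건 충족
--                             i=j-1 #이렇게 안하면 while loop 마지막 i+1때문에 하나 건너고 진행해버림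
--                             break
--                         if way[j]==now: #높이가 계속 같은 경우 count+1
--                             count+=1
--                         else: # 아직 설치할 충분한 길이가 안됐는데 높이가 달라지면 설치 못함
--                             return False
--                         runway[j]=1 # 경사로
--
--             accumulate=1 # 경사로 다 깔았으니까 경사로 설치 다음 부터 다시 시작
--         before = now
--         i+=1
--
--     return True
-- ===== SOURCE B (Python) =====
-- def runway(l, way):
--     # Run-length encode the line, then judge adjacent runs with a remaining-capacity counter.
--     runs = []
--     for h in way:
--         if runs and runs[-1][0] == h:
--             runs[-1][1] += 1
--         else:
--             runs.append([h, 1])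
--     if not runs:
--         return True
--     prev_h, rem = runs[0][0], runs[0][1]
--     for h, cnt in runs[1:]:
--         if h == prev_h + 1:
--             if rem < l:
--                 return False
--             rem = cnt
--         elif h == prev_h - 1:
--             if cnt < l:
--                 return False
--             rem = cnt - l
--         else:
--             return False
--         prev_h = h
--     return True
-- ===== Notes on version B (the rewrite author's own statement) =====
-- stated objective: simpler
-- what changed: B run-length encodes the line once and judges each adjacent pair of runs with a remaining-capacity counter, replacing A's cell-by-cell scan with a ramp-marker array, an accumulate counter, backward/forward inner loops and index jumping (one pass over runs, no per-cell marker bookkeeping).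
-- outside the precondition, e.g. on runway(0, [1, 0, 1]): A returns False, B returns True
import Mathlib
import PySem

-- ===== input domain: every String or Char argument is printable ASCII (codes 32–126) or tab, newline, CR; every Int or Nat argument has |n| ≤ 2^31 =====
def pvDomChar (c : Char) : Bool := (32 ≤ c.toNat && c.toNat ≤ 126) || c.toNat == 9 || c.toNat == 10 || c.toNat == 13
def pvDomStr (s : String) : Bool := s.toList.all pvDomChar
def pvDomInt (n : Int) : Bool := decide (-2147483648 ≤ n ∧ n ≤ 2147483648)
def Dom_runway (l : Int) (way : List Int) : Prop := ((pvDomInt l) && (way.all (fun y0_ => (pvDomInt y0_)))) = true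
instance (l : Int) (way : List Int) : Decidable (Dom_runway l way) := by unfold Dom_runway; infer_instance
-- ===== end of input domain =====

-- B replaces A's cell scan with marker array and index jumping by a run-length encoding judged run by run (simpler; return value equivalence, A mutates nothing observable).


-- ===== PORT A =====
-- inner ascent check: 'for j in range(i-1, i-2-l, -1): if count==l: break; if runway[j]==1: return False; count+=1'
-- (true = fall through the loop; PySem.List.pyGet? rw j is Python's runway[j]; the none case is unreachable under Pre_)
def runwayAsc (l : Int) (rw : List Int) : List Int → Int → Bool
  | [], _ => true
  | j :: js, count =>
    if count = l then true
    else if PySem.List.pyGet? rw j = some 1 then false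
    else runwayAsc l rw js (count + 1)

-- inner descent loop: 'for j in range(i+1, len(way)): …'; none = 'return False',
-- some (runway', i') = state after the loop (i' = j-1 on break, i unchanged if the loop exhausts)
def runwayDesc (l : Int) (way : List Int) (now : Int) (i : Nat) : List Nat → Int → List Int → Option (List Int × Nat)
  | [], _, rw => some (rw, i)
  | j :: js, count, rw =>
    if count = l then some (rw, j - 1)
    else if way.getD j 0 = now then runwayDesc l way now i js (count + 1) (rw.set j 1)
    else none

-- termination helper for the outer while loop: the descent loop never moves i backwards
theorem runwayDesc_ge (l : Int) (way : List Int) (now : Int) (i : Nat) :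
    ∀ (js : List Nat) (c : Int) (rw rw2 : List Int) (i2 : Nat),
      (∀ j ∈ js, i + 1 ≤ j) → runwayDesc l way now i js c rw = some (rw2, i2) → i ≤ i2 := by
  intro js
  induction js with
  | nil => intro c rw rw2 i2 _ h; simp [runwayDesc] at h; omega
  | cons j js ih =>
    intro c rw rw2 i2 hmem h
    simp only [runwayDesc] at h
    split_ifs at h with h1 h2
    · have : i + 1 ≤ j := hmem j (by simp)
      simp at h; omega
    · exact ih (c + 1) (rw.set j 1) rw2 i2 (fun x hx => hmem x (by simp [hx])) h

-- the while loop of A; i, accumulate, before, runway are the Python locals (all indices stay ≥ 0)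
def runwayLoop (l : Int) (way : List Int) (i : Nat) (accumulate before : Int) (rw : List Int) : Bool :=
  if hle : way.length ≤ i then true
  else
    -- now := way[i], diff := now - before (locals inlined)
    if way.getD i 0 = before ∧ rw.getD (i - 1) 0 ≠ 1 then
      runwayLoop l way (i + 1) (accumulate + 1) (way.getD i 0) rw
    else
      if 2 ≤ |way.getD i 0 - before| then false
      else if way.getD i 0 - before = 1 then
        if accumulate < l then false
        else if rw.getD (i - 1) 0 = 1 then false
        else if runwayAsc l rw (PySem.List.pyRange ((i : Int) - 1) ((i : Int) - 2 - l) (-1)) 1 then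
          runwayLoop l way (i + 1) 1 (way.getD i 0) rw
        else false
      else if way.getD i 0 - before = -1 then
        if (way.length : Int) - (i : Int) < l then false
        else
          match hd : runwayDesc l way (way.getD i 0) i (List.range' (i + 1) (way.length - (i + 1))) 1 (rw.set i 1) with
          | none => false
          | some (rw2, i2) => runwayLoop l way (i2 + 1) 1 (way.getD i 0) rw2
      else runwayLoop l way (i + 1) 1 (way.getD i 0) rw
termination_by way.length - i
decreasing_by
  all_goals try omega
  all_goals
    have hge : i ≤ i2 := by
      refine runwayDesc_ge l way (way.getD i 0) i _ 1 (rw.set i 1) rw2 i2 ?_ hd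
      intro j hj
      have := List.mem_range'_1.mp hj
      omega
    omega

def runway (l : Int) (way : List Int) : Bool :=
  match PySem.List.pyGet? way 0 with
  | none => false          -- Python raises IndexError here (way = [], excluded by Pre_)
  | some b0 => runwayLoop l way 1 1 b0 (List.replicate way.length 0)

-- ===== PORT B =====
-- 'if runs and runs[-1][0] == h: runs[-1][1] += 1 else: runs.append([h, 1])'
def altStep (runs : List (Int × Int)) (h : Int) : List (Int × Int) :=
  match runs.getLast? with
  | some (g, c) => if g = h then runs.dropLast ++ [(g, c + 1)] else runs ++ [(h, 1)]
  | none => runs ++ [(h, 1)]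

-- the 'for h, cnt in runs[1:]' loop with state (prev_h, rem)
def altScan (l : Int) : Int → Int → List (Int × Int) → Bool
  | _, _, [] => true
  | prevh, rem, (h, cnt) :: rs =>
    if h = prevh + 1 then (if rem < l then false else altScan l h cnt rs)
    else if h = prevh - 1 then (if cnt < l then false else altScan l h (cnt - l) rs)
    else false

def runway_alt (l : Int) (way : List Int) : Bool :=
  match way.foldl altStep [] with
  | [] => true
  | (h0, c0) :: rest => altScan l h0 c0 rest

-- ===== PRECONDITION & SPEC =====
-- Pre_ keeps the problem's natural domain: ramp length l ≥ 1 (the contest statement guarantees L ≥ 1;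
-- for l ≤ 0 A's 'count == l' break conditions degenerate accidentally — see the cite) and a nonempty
-- line (A reads way[0] before its loop and raises IndexError on []).
def Pre_runway (l : Int) (way : List Int) : Prop := 1 ≤ l ∧ way ≠ []
instance (l : Int) (way : List Int) : Decidable (Pre_runway l way) := by unfold Pre_runway; infer_instance
def pvWitness_runway : Int × List Int := (2, [0, 0, 1, 1])

def Spec_runway (l : Int) (way : List Int) (out : Bool) : Prop := out = runway_alt l way
instance (l : Int) (way : List Int) (out : Bool) : Decidable (Spec_runway l way out) := by unfold Spec_runway; infer_instance

-- ===== CLAIM (what is proved, stated in full; the proofs are below) =====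
def Claim_equal_runway : Prop := ∀ (l : Int) (way : List Int), Dom_runway l way → Pre_runway l way → Spec_runway l way (runway l way)

-- ===== LEMMAS AND PROOFS =====

-- cell-level reference function: A's loop without the marker array
def pvF (l : Int) : Int → Int → List Int → Bool
  | _, _, [] => true
  | before, acc, h :: rest =>
    if h = before then pvF l before (acc + 1) rest
    else if h = before + 1 then (if acc < l then false else pvF l h 1 rest)
    else if h = before - 1 then
      (if (rest.length : Int) + 1 < l then false
       else if (rest.take (l - 1).toNat).all (fun x => x == h) then pvF l h 0 (rest.drop (l - 1).toNat)
       else false)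
    else false
termination_by _ _ t => t.length
decreasing_by
  all_goals simp [List.length_drop]
  all_goals omega

-- canonical run-length encoding (what B's foldl builds)
def pvConsume (g : Int) (c : Int) : List Int → List (Int × Int)
  | [] => [(g, c)]
  | h :: t => if h = g then pvConsume g (c + 1) t else (g, c) :: pvConsume h 1 t

def pvRuns : List Int → List (Int × Int)
  | [] => []
  | h :: t => pvConsume h 1 t

theorem getD_set_ne (rw : List Int) (a j : Nat) (v d : Int) (h : a ≠ j) :
    (rw.set a v).getD j d = rw.getD j d := by
  simp [List.getD, List.getElem?_set_ne h]

theorem getD_set_self (rw : List Int) (a : Nat) (v d : Int) (h : a < rw.length) :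
    (rw.set a v).getD a d = v := by
  simp [List.getD, List.getElem?_set_self, h]

theorem asc_true (l : Int) (rw : List Int) :
    ∀ (n : Nat) (a b c : Int), c + n = l →
      (∀ j : Int, a - n < j → j ≤ a → PySem.List.pyGet? rw j ≠ some 1) →
      runwayAsc l rw (PySem.List.pyRange a b (-1)) c = true := by
  intro n
  induction n with
  | zero =>
    intro a b c hc _
    have hcl : c = l := by omega
    cases hpr : PySem.List.pyRange a b (-1) with
    | nil => simp [runwayAsc]
    | cons j js => simp [runwayAsc, hcl]
  | succ n ih =>
    intro a b c hc hsafe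
    by_cases hab : a ≤ b
    · rw [PySem.List.pyRange_neg_one_eq_nil hab]; simp [runwayAsc]
    · rw [PySem.List.pyRange_neg_one_cons (by omega)]
      have hcl : ¬ c = l := by omega
      have h1 : ¬ PySem.List.pyGet? rw a = some 1 := hsafe a (by omega) le_rfl
      simp only [runwayAsc, if_neg hcl, if_neg h1]
      exact ih (a - 1) b (c + 1) (by omega) (fun j hj1 hj2 => hsafe j (by omega) (by omega))

theorem desc_ok (l : Int) (way : List Int) (now : Int) (i : Nat) :
    ∀ (k a m : Nat) (c : Int) (rw : List Int), c + k = l → k ≤ m → a + k ≤ rw.length →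
      (∀ j : Nat, a ≤ j → j < a + k → way.getD j 0 = now) →
      ∃ rw2 : List Int,
        runwayDesc l way now i (List.range' a m) c rw = some (rw2, if k < m then a + k - 1 else i) ∧
        rw2.length = rw.length ∧
        (∀ j : Nat, a + k ≤ j → rw2.getD j 0 = rw.getD j 0) ∧
        (k = 0 → rw2 = rw) ∧
        (1 ≤ k → rw2.getD (a + k - 1) 0 = 1) := by
  intro k
  induction k with
  | zero =>
    intro a m c rw hc _ _ _
    have hcl : c = l := by omega
    cases m with
    | zero =>
      refine ⟨rw, ?_, rfl, fun _ _ => rfl, fun _ => rfl, fun h => absurd h (by omega)⟩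
      simp [runwayDesc]
    | succ m =>
      refine ⟨rw, ?_, rfl, fun _ _ => rfl, fun _ => rfl, fun h => absurd h (by omega)⟩
      rw [List.range'_succ]
      simp [runwayDesc, hcl]
  | succ k ih =>
    intro a m c rw hc hkm hlen hhts
    have hcl : ¬ c = l := by omega
    cases m with
    | zero => omega
    | succ m =>
      rw [List.range'_succ]
      have ha : way.getD a 0 = now := hhts a le_rfl (by omega)
      simp only [runwayDesc, if_neg hcl, if_pos ha]
      obtain ⟨rw2, hres, hlen2, hbeyond, hzero, hlast⟩ :=
        ih (a + 1) m (c + 1) (rw.set a 1) (by omega) (by omega) (by simpa using by omega)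
          (fun j hj1 hj2 => hhts j (by omega) (by omega))
      refine ⟨rw2, ?_, by simpa using hlen2, ?_, fun h => absurd h (by omega), ?_⟩
      · rcases Nat.lt_or_ge k m with h | h
        · rw [hres, if_pos h, if_pos (by omega)]; congr 2; omega
        · rw [hres, if_neg (by omega), if_neg (by omega)]
      · intro j hj
        rw [hbeyond j (by omega), getD_set_ne rw a j 1 0 (by omega)]
      · intro _
        rcases Nat.eq_zero_or_pos k with h0 | hpos
        · subst h0
          rw [hzero rfl, show a + (0 + 1) - 1 = a by omega]
          exact getD_set_self rw a 1 0 (by omega)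
        · rw [show a + (k + 1) - 1 = (a + 1) + k - 1 by omega]
          exact hlast hpos

theorem desc_fail (l : Int) (way : List Int) (now : Int) (i : Nat) :
    ∀ (k a m : Nat) (c : Int) (rw : List Int), c + k = l → k ≤ m →
      ¬ (∀ j : Nat, a ≤ j → j < a + k → way.getD j 0 = now) →
      runwayDesc l way now i (List.range' a m) c rw = none := by
  intro k
  induction k with
  | zero =>
    intro a m c rw _ _ hbad
    exact absurd (fun j _ h2 => absurd h2 (by omega)) hbad
  | succ k ih =>
    intro a m c rw hc hkm hbad
    have hcl : ¬ c = l := by omega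
    cases m with
    | zero => omega
    | succ m =>
      rw [List.range'_succ]
      by_cases ha : way.getD a 0 = now
      · simp only [runwayDesc, if_neg hcl, if_pos ha]
        refine ih (a + 1) m (c + 1) (rw.set a 1) (by omega) (by omega) ?_
        intro hall
        apply hbad
        intro j hj1 hj2
        by_cases hja : j = a
        · subst hja; exact ha
        · exact hall j (by omega) (by omega)
      · simp only [runwayDesc, if_neg hcl, if_neg ha]

-- if every remaining cell equals before, A's loop always answers true (marks only reset accumulate)
theorem allEq_true (l : Int) (way : List Int) :
    ∀ (n i : Nat) (acc before : Int) (rw : List Int), way.length - i ≤ n →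
      (∀ j : Nat, i ≤ j → j < way.length → way.getD j 0 = before) →
      runwayLoop l way i acc before rw = true := by
  intro n
  induction n with
  | zero =>
    intro i acc before rw hn _
    rw [runwayLoop]
    simp [show way.length ≤ i by omega]
  | succ n ih =>
    intro i acc before rw hn hall
    rw [runwayLoop]
    by_cases hle : way.length ≤ i
    · simp [hle]
    · have hnow : way.getD i 0 = before := hall i (by omega) (by omega)
      simp only [dif_neg hle, hnow, sub_self, abs_zero]
      split_ifs
      all_goals
        first
          | exact ih (i + 1) (acc + 1) before rw (by omega) (fun j hj1 hj2 => hall j (by omega) hj2)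
          | exact ih (i + 1) 1 before rw (by omega) (fun j hj1 hj2 => hall j (by omega) hj2)
          | (exfalso; omega)

-- all cells way[a..a+K) equal x, phrased as Python sees it vs as pvF sees it
theorem take_drop_all (way : List Int) (x : Int) (a K : Nat) (hKlen : a + K ≤ way.length) :
    (((way.drop a).take K).all (fun y => y == x) = true) ↔
      (∀ j : Nat, a ≤ j → j < a + K → way.getD j 0 = x) := by
  rw [List.all_eq_true]
  constructor
  · intro hall j hj1 hj2
    have hjlen : j < way.length := by omega
    have hidx : j - a < ((way.drop a).take K).length := by
      simp [List.length_take, List.length_drop]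
      omega
    have hval : ((way.drop a).take K)[j - a]'hidx = way[j]'hjlen := by
      rw [List.getElem_take, List.getElem_drop]
      congr 1
      omega
    have hmem : way[j]'hjlen ∈ (way.drop a).take K := by
      rw [← hval]
      exact List.getElem_mem hidx
    have := hall _ hmem
    simp at this
    rw [List.getD_eq_getElem way 0 hjlen]
    exact this
  · intro hP y hy
    obtain ⟨idx, hidx, rfl⟩ := List.mem_iff_getElem.mp hy
    have hidx2 : idx < K := by
      have := hidx
      simp [List.length_take, List.length_drop] at this
      omega
    have hjlen : a + idx < way.length := by omega
    have hval : ((way.drop a).take K)[idx]'hidx = way[a + idx]'hjlen := by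
      rw [List.getElem_take, List.getElem_drop]
    have := hP (a + idx) (by omega) (by omega)
    rw [List.getD_eq_getElem way 0 hjlen] at this
    simp [hval, this]

-- the heart: A's loop equals the markerless reference pvF
theorem A_eq_F (l : Int) (way : List Int) (hl : 1 ≤ l) :
    ∀ (n i : Nat) (accA accF before : Int) (rw : List Int),
      way.length - i ≤ n → 1 ≤ i → i ≤ way.length → rw.length = way.length →
      1 ≤ accA → accA ≤ (i : Int) →
      (∀ j : Nat, (i : Int) - accF ≤ (j : Int) → rw.getD j 0 ≠ 1) →
      (accA = accF ∨ (accF = 0 ∧ accA = 1 ∧ rw.getD (i - 1) 0 = 1)) →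
      runwayLoop l way i accA before rw = pvF l before accF (way.drop i) := by
  intro n
  induction n with
  | zero =>
    intro i accA accF before rw hn h1i hilen hrwlen hA1 hAi H4 hrel
    have hd0 : way.drop i = [] := List.drop_eq_nil_of_le (by omega)
    rw [runwayLoop]
    simp [show way.length ≤ i by omega, hd0, pvF]
  | succ n ih =>
    intro i accA accF before rw hn h1i hilen hrwlen hA1 hAi H4 hrel
    by_cases hle : way.length ≤ i
    · have hd0 : way.drop i = [] := List.drop_eq_nil_of_le hle
      rw [runwayLoop]
      simp [hle, hd0, pvF]
    · have hi : i < way.length := by omega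
      have hdrop : way.drop i = way[i] :: way.drop (i + 1) := List.drop_eq_getElem_cons hi
      have hgetD : way.getD i 0 = way[i] := List.getD_eq_getElem way 0 hi
      have haccF0 : 0 ≤ accF := by rcases hrel with h | ⟨h1, h2, h3⟩ <;> omega
      rw [runwayLoop, hdrop]
      simp only [dif_neg hle, hgetD]
      by_cases hx : way[i] = before
      · -- equal heights: A either counts on or (marked) resets; F counts on
        simp only [hx]
        rw [show pvF l before accF (before :: way.drop (i + 1)) =
              pvF l before (accF + 1) (way.drop (i + 1)) from by simp [pvF]]
        rcases hrel with hrel1 | ⟨hF0, hA1', hmark⟩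
        · have hm : rw.getD (i - 1) 0 ≠ 1 := H4 (i - 1) (by omega)
          rw [if_pos (show _ ∧ _ from ⟨by simp, hm⟩)]
          exact ih (i + 1) (accA + 1) (accF + 1) before rw (by omega) (by omega) (by omega)
            hrwlen (by omega) (by omega) (fun j hj => H4 j (by omega)) (Or.inl (by omega))
        · rw [if_neg (fun hc => hc.2 hmark), show before - before = 0 by omega]
          norm_num
          exact ih (i + 1) 1 (accF + 1) before rw (by omega) (by omega) (by omega)
            hrwlen (by omega) (by omega) (fun j hj => H4 j (by omega)) (Or.inl (by omega))
      · rw [if_neg (fun hc => hx hc.1)]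
        by_cases hup : way[i] = before + 1
        · -- ascent
          rw [if_neg (show ¬ 2 ≤ |way[i] - before| from by rw [hup]; simp)]
          rw [if_pos (show way[i] - before = 1 by omega)]
          rw [show pvF l before accF (way[i] :: way.drop (i + 1)) =
                if accF < l then false else pvF l way[i] 1 (way.drop (i + 1)) from by
              simp only [pvF, if_neg hx, if_pos hup]]
          by_cases hlt : accF < l
          · rw [if_pos hlt]
            rcases hrel with hrel1 | ⟨hF0, hA1', hmark⟩
            · rw [if_pos (show accA < l by omega)]
            · by_cases hAlt : accA < l
              · rw [if_pos hAlt]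
              · rw [if_neg hAlt, if_pos hmark]
          · rw [if_neg hlt]
            have hrel1 : accA = accF := by
              rcases hrel with h | ⟨h1, h2, h3⟩
              · exact h
              · omega
            rw [if_neg (show ¬ accA < l by omega)]
            have hm : rw.getD (i - 1) 0 ≠ 1 := H4 (i - 1) (by omega)
            rw [if_neg hm]
            have hasc : runwayAsc l rw (PySem.List.pyRange ((i : Int) - 1) ((i : Int) - 2 - l) (-1)) 1 = true := by
              apply asc_true l rw (l - 1).toNat ((i : Int) - 1) ((i : Int) - 2 - l) 1 (by omega)
              intro j hj1 hj2
              have hK : (((l - 1).toNat : Nat) : Int) = l - 1 := Int.toNat_of_nonneg (by omega)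
              have hj0 : 0 ≤ j := by omega
              have hjlen : j.toNat < rw.length := by omega
              have hjlen' : j < (rw.length : Int) := by omega
              rw [PySem.List.pyGet?_eq_some_getElem rw hj0 hjlen']
              intro hsome
              have h1 : rw[j.toNat]'hjlen = 1 := by simpa using hsome
              have h2 : rw.getD j.toNat 0 ≠ 1 := H4 j.toNat (by omega)
              rw [List.getD_eq_getElem rw 0 hjlen] at h2
              exact h2 h1
            rw [if_pos hasc]
            exact ih (i + 1) 1 1 way[i] rw (by omega) (by omega) (by omega) hrwlen
              (by omega) (by omega) (fun j hj => H4 j (by omega)) (Or.inl rfl)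
        · by_cases hdn : way[i] = before - 1
          · -- descent
            rw [if_neg (show ¬ 2 ≤ |way[i] - before| from by rw [hdn]; simp)]
            rw [if_neg (show ¬ way[i] - before = 1 by omega)]
            rw [if_pos (show way[i] - before = -1 by omega)]
            rw [show pvF l before accF (way[i] :: way.drop (i + 1)) =
                  if ((way.drop (i + 1)).length : Int) + 1 < l then false
                  else if ((way.drop (i + 1)).take (l - 1).toNat).all (fun x => x == way[i]) then
                    pvF l way[i] 0 ((way.drop (i + 1)).drop (l - 1).toNat)
                  else false from by
              simp only [pvF, if_neg hx, if_neg hup, if_pos hdn]]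
            have hdlen : (way.drop (i + 1)).length = way.length - (i + 1) := by simp
            have hK : (((l - 1).toNat : Nat) : Int) = l - 1 := Int.toNat_of_nonneg (by omega)
            by_cases hroom : (way.length : Int) - (i : Int) < l
            · rw [if_pos hroom, if_pos (show ((way.drop (i + 1)).length : Int) + 1 < l from by
                rw [hdlen]; omega)]
            · rw [if_neg hroom, if_neg (show ¬ (((way.drop (i + 1)).length : Int) + 1 < l) from by
                rw [hdlen]; omega)]
              have hKlen : (i + 1) + (l - 1).toNat ≤ way.length := by omega
              by_cases hP : ∀ j : Nat, i + 1 ≤ j → j < (i + 1) + (l - 1).toNat → way.getD j 0 = way.getD i 0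
              · have hPg : ∀ j : Nat, i + 1 ≤ j → j < (i + 1) + (l - 1).toNat → way.getD j 0 = way[i] :=
                  fun j h1 h2 => (hP j h1 h2).trans hgetD
                obtain ⟨rw2, hres, hlen2, hbeyond, hzero, hlast⟩ :=
                  desc_ok l way (way.getD i 0) i (l - 1).toNat (i + 1) (way.length - (i + 1)) 1 (rw.set i 1)
                    (by omega) (by omega) (by simpa using by omega) hP
                rw [if_pos ((take_drop_all way way[i] (i + 1) (l - 1).toNat hKlen).mpr hPg)]
                split
                · next heq => exact absurd (hres.symm.trans heq) (by simp)
                · next rw2' i2' heq =>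
                  obtain ⟨hrw2, hi2⟩ : rw2 = rw2' ∧ (if (l - 1).toNat < way.length - (i + 1) then (i + 1) + (l - 1).toNat - 1 else i) = i2' := by
                    simpa using hres.symm.trans heq
                  subst hrw2
                  have hlen2' : rw2.length = way.length := by simpa [hrwlen] using hlen2
                  by_cases hbig : (l - 1).toNat < way.length - (i + 1)
                  · rw [if_pos hbig] at hi2
                    subst hi2
                    rw [List.drop_drop]
                    rw [show (i + 1) + (l - 1).toNat - 1 + 1 = i + 1 + (l - 1).toNat by omega]
                    apply ih (i + 1 + (l - 1).toNat) 1 0 way[i] rw2 (by omega) (by omega)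
                      (by omega) hlen2' (by omega) (by omega)
                    · intro j hj
                      rw [hbeyond j (by omega), getD_set_ne rw i j 1 0 (by omega)]
                      exact H4 j (by omega)
                    · refine Or.inr ⟨rfl, rfl, ?_⟩
                      rcases Nat.eq_zero_or_pos (l - 1).toNat with h0 | hpos
                      · rw [show i + 1 + (l - 1).toNat - 1 = i by omega, hzero h0]
                        exact getD_set_self rw i 1 0 (by omega)
                      · rw [show i + 1 + (l - 1).toNat - 1 = (i + 1) + (l - 1).toNat - 1 by omega]
                        exact hlast hpos
                  · rw [if_neg hbig] at hi2
                    subst hi2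
                    rw [List.drop_drop, show i + 1 + (l - 1).toNat = way.length by omega,
                      List.drop_length]
                    rw [show pvF l way[i] 0 [] = true from by simp [pvF]]
                    exact allEq_true l way way.length (i + 1) 1 way[i] rw2 (by omega)
                      (fun j hj1 hj2 => hPg j hj1 (by omega))
              · have hPneg : ¬ ∀ j : Nat, i + 1 ≤ j → j < (i + 1) + (l - 1).toNat → way.getD j 0 = way[i] :=
                  fun hPg' => hP (fun j h1 h2 => (hPg' j h1 h2).trans hgetD.symm)
                have hfail := desc_fail l way (way.getD i 0) i (l - 1).toNat (i + 1)
                  (way.length - (i + 1)) 1 (rw.set i 1) (by omega) (by omega) hP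
                rw [if_neg (fun hall => hPneg ((take_drop_all way way[i] (i + 1) (l - 1).toNat hKlen).mp hall))]
                split
                · next heq => rfl
                · next rw2' i2' heq => exact absurd (hfail.symm.trans heq) (by simp)
          · -- |diff| ≥ 2: both reject
            rw [if_pos (show 2 ≤ |way[i] - before| from by
              rcases abs_cases (way[i] - before) with ⟨h1, h2⟩ | ⟨h1, h2⟩ <;> omega)]
            rw [show pvF l before accF (way[i] :: way.drop (i + 1)) = false from by
              simp only [pvF, if_neg hx, if_neg hup, if_neg hdn]]

theorem pvF_replicate (l g : Int) :
    ∀ (k : Nat) (a : Int) (t : List Int), pvF l g a (List.replicate k g ++ t) = pvF l g (a + k) t := by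
  intro k
  induction k with
  | zero => intro a t; simp
  | succ k ih =>
    intro a t
    simp only [List.replicate_succ, List.cons_append, pvF, if_pos rfl]
    have h2 : a + 1 + (k : Int) = a + ((k + 1 : Nat) : Int) := by push_cast; ring
    rw [ih, h2]
    simp

theorem consume_replicate (g : Int) :
    ∀ (k : Nat) (c : Int) (t : List Int), pvConsume g c (List.replicate k g ++ t) = pvConsume g (c + k) t := by
  intro k
  induction k with
  | zero => intro c t; simp
  | succ k ih =>
    intro c t
    simp only [List.replicate_succ, List.cons_append, pvConsume, if_pos rfl]
    have h2 : c + 1 + (k : Int) = c + ((k + 1 : Nat) : Int) := by push_cast; ring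
    rw [ih, h2]
    simp

theorem consume_ne (g : Int) (c : Int) (t : List Int) (h : ∀ x ∈ t.head?, x ≠ g) :
    pvConsume g c t = (g, c) :: pvRuns t := by
  cases t with
  | nil => simp [pvConsume, pvRuns]
  | cons x t' =>
    have hx : x ≠ g := h x (by simp)
    simp [pvConsume, pvRuns, hx]

theorem split_lead (g : Int) :
    ∀ (t : List Int), ∃ (k : Nat) (t' : List Int),
      t = List.replicate k g ++ t' ∧ (∀ x ∈ t'.head?, x ≠ g) ∧ t'.length + k = t.length := by
  intro t
  induction t with
  | nil => exact ⟨0, [], by simp⟩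
  | cons h t ih =>
    by_cases hg : h = g
    · obtain ⟨k, t', h1, h2, h3⟩ := ih
      exact ⟨k + 1, t', by simp [List.replicate_succ, hg, h1], h2, by simp; omega⟩
    · exact ⟨0, h :: t, by simp, by simpa using hg, by simp⟩

theorem foldl_altStep :
    ∀ (xs : List Int) (rs : List (Int × Int)) (g c : Int),
      List.foldl altStep (rs ++ [(g, c)]) xs = rs ++ pvConsume g c xs := by
  intro xs
  induction xs with
  | nil => intro rs g c; simp [pvConsume]
  | cons h xs ih =>
    intro rs g c
    simp only [List.foldl_cons]
    by_cases hg : g = h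
    · have : altStep (rs ++ [(g, c)]) h = rs ++ [(g, c + 1)] := by
        simp [altStep, List.getLast?_concat, hg]
      rw [this, ih, pvConsume, if_pos hg.symm]
    · have : altStep (rs ++ [(g, c)]) h = (rs ++ [(g, c)]) ++ [(h, 1)] := by
        simp [altStep, List.getLast?_concat, hg]
      rw [this, ih]
      have hne : h ≠ g := fun hh => hg hh.symm
      simp [pvConsume, hne]

-- the reference pvF equals B's scan over the canonical runs
theorem F_eq_scan (l : Int) (hl : 1 ≤ l) :
    ∀ (n : Nat) (g a : Int) (t : List Int), t.length ≤ n → (∀ x ∈ t.head?, x ≠ g) →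
      pvF l g a t = altScan l g a (pvRuns t) := by
  intro n
  induction n with
  | zero =>
    intro g a t hlen _
    cases t with
    | nil => simp [pvF, pvRuns, altScan]
    | cons h t2 => simp at hlen
  | succ n ih =>
    intro g a t hlen hhead
    cases t with
    | nil => simp [pvF, pvRuns, altScan]
    | cons h t2 =>
      have hg : h ≠ g := hhead h (by simp)
      obtain ⟨k, t3, hsp, hh3, hlen3⟩ := split_lead h t2
      have hlen2 : t2.length = k + t3.length := by rw [hsp]; simp [Nat.add_comm]
      have ht3n : t3.length ≤ n := by simp at hlen; omega
      have hruns : pvRuns (h :: t2) = (h, 1 + (k : Int)) :: pvRuns t3 := by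
        simp only [pvRuns]
        rw [hsp, consume_replicate]
        exact consume_ne h (1 + (k : Int)) t3 hh3
      rw [hruns]
      by_cases hup : h = g + 1
      · rw [show pvF l g a (h :: t2) = if a < l then false else pvF l h 1 t2 from by
            simp [pvF, hg, hup]]
        rw [show altScan l g a ((h, 1 + (k : Int)) :: pvRuns t3) =
              if a < l then false else altScan l h (1 + (k : Int)) (pvRuns t3) from by
            simp [altScan, hup]]
        by_cases ha : a < l
        · simp [ha]
        · simp only [if_neg ha]
          rw [hsp, pvF_replicate]
          exact ih h (1 + (k : Int)) t3 ht3n hh3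
      · by_cases hdn : h = g - 1
        · have hK : ((l - 1).toNat : Int) = l - 1 := Int.toNat_of_nonneg (by omega)
          have hA : pvF l g a (h :: t2) =
              if (t2.length : Int) + 1 < l then false
              else if (t2.take (l - 1).toNat).all (fun x => x == h) then
                pvF l h 0 (t2.drop (l - 1).toNat)
              else false := by
            simp only [pvF, if_neg hg, if_neg hup, if_pos hdn]
          have hB : altScan l g a ((h, 1 + (k : Int)) :: pvRuns t3) =
              if 1 + (k : Int) < l then false
              else altScan l h (1 + (k : Int) - l) (pvRuns t3) := by
            simp only [altScan, if_neg hup, if_pos hdn]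
          by_cases hck : l ≤ 1 + (k : Int)
          · have hKk : (l - 1).toNat ≤ k := by omega
            have htake : t2.take (l - 1).toNat = List.replicate (l - 1).toNat h := by
              rw [hsp, List.take_append_of_le_length (by simpa using hKk), List.take_replicate]
              congr 1
              omega
            have hdrop : t2.drop (l - 1).toNat = List.replicate (k - (l - 1).toNat) h ++ t3 := by
              rw [hsp, List.drop_append_of_le_length (by simpa using hKk), List.drop_replicate]
            rw [hA, hB]
            rw [if_neg (show ¬ ((t2.length : Int) + 1 < l) by omega)]
            rw [if_neg (show ¬ (1 + (k : Int) < l) by omega)]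
            rw [if_pos (show ((t2.take (l - 1).toNat).all (fun x => x == h)) = true from by
              rw [htake]; simp)]
            rw [hdrop, pvF_replicate,
              show (0 : Int) + ((k - (l - 1).toNat : Nat) : Int) = 1 + (k : Int) - l by omega]
            exact ih h (1 + (k : Int) - l) t3 ht3n hh3
          · rw [hB, if_pos (by omega), hA]
            by_cases hlc : (t2.length : Int) + 1 < l
            · rw [if_pos hlc]
            · rw [if_neg hlc]
              have ht3 : t3 ≠ [] := by
                intro hnil
                rw [hnil] at hlen2
                simp at hlen2
                omega
              obtain ⟨c, t4, rfl⟩ := List.exists_cons_of_ne_nil ht3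
              have hc : c ≠ h := hh3 c (by simp)
              have hkK : k < (l - 1).toNat := by omega
              have hkt2 : k < t2.length := by omega
              have helem : t2[k]'hkt2 = c := by
                simp [hsp, List.getElem_append_right, List.length_replicate]
              have hallf : ¬ ((t2.take (l - 1).toNat).all (fun x => x == h) = true) := by
                intro hall
                have hmem : c ∈ t2.take (l - 1).toNat := by
                  have hkt : k < (t2.take (l - 1).toNat).length := by
                    simp [List.length_take]
                    omega
                  have : (t2.take (l - 1).toNat)[k]'hkt = c := by
                    rw [List.getElem_take]
                    exact helem
                  rw [← this]
                  exact List.getElem_mem hkt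
                have := List.all_eq_true.mp hall c hmem
                simp at this
                exact hc this
              rw [if_neg hallf]
        · simp [pvF, altScan, hg, hup, hdn]

-- ===== VERDICT (by name: the statement is the Claim_ definition above) =====
theorem runway_spec : Claim_equal_runway := by
  unfold Claim_equal_runway
  intro l way _ hpre
  unfold Spec_runway
  obtain ⟨hl, hway⟩ := hpre
  cases way with
  | nil => exact absurd rfl hway
  | cons w0 t =>
    have hrep : ∀ j : Nat, (List.replicate (w0 :: t).length (0 : Int)).getD j 0 ≠ 1 := by
      intro j
      by_cases hj : j < (w0 :: t).length
      · rw [List.getD_eq_getElem _ _ (by simpa using hj)]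
        simp
      · rw [List.getD_eq_default _ _ (by simpa using hj)]
        norm_num
    have hA : runway l (w0 :: t) = pvF l w0 1 t := by
      simp only [runway, PySem.List.pyGet?_zero_cons]
      rw [A_eq_F l (w0 :: t) hl (w0 :: t).length 1 1 1 w0 (List.replicate (w0 :: t).length 0)
        (by omega) le_rfl (by simp) (by simp) le_rfl (by norm_num)
        (fun j _ => hrep j) (Or.inl rfl)]
      simp
    obtain ⟨k, t', hsp, hhead, hlenk⟩ := split_lead w0 t
    have hfold : List.foldl altStep [] (w0 :: t) = (w0, 1 + (k : Int)) :: pvRuns t' := by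
      rw [List.foldl_cons, show altStep [] w0 = [] ++ [((w0 : Int), (1 : Int))] from by simp [altStep],
        foldl_altStep, hsp, consume_replicate]
      simpa using consume_ne w0 (1 + (k : Int)) t' hhead
    rw [show runway_alt l (w0 :: t) = altScan l w0 (1 + (k : Int)) (pvRuns t') from by
      simp only [runway_alt, hfold]]
    rw [hA, hsp, pvF_replicate, F_eq_scan l hl t'.length w0 (1 + (k : Int)) t' le_rfl hhead]
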